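-- pv_equiv track=rewrite | github.com/Marvan-IT/ADAPTIVE-LEARNER | backend/src/api/teaching_service.py | _batch_consecutive_try_its
-- ===== SOURCE A (Python) =====
-- def _batch_consecutive_try_its(
--     sections: list[dict],
--     max_batch: int = 4,
-- ) -> list[dict]:
--     """
--     FAST mode only: merge runs of consecutive TRY_IT sections into a single TRY_IT_BATCH.
--     Solo TRY_IT sections (run length = 1) are passed through unchanged.
--     """
--     result: list[dict] = []
--     i = 0
--     while i < len(sections):
--         if sections[i].get("section_type") != "TRY_IT":
--             result.append(sections[i])
--             i += 1
--             continue
--         # Collect consecutive TRY_IT run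
--         batch: list[dict] = [sections[i]]
--         while (
--             i + len(batch) < len(sections)
--             and sections[i + len(batch)].get("section_type") == "TRY_IT"
--             and len(batch) < max_batch
--         ):
--             batch.append(sections[i + len(batch)])
--         if len(batch) == 1:
--             result.append(batch[0])
--         else:
--             first_title = batch[0]["title"]
--             last_title  = batch[-1]["title"]
--             merged_text = "\n\n".join(
--                 f"({chr(97 + j)}) {s['title']}\n{s['text']}"
--                 for j, s in enumerate(batch)
--             )
--             result.append({
--                 "title": f"{first_title} – {last_title}",
--                 "text":  merged_text,
--                 "section_type": "TRY_IT_BATCH",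
--             })
--         i += len(batch)
--     return result
-- ===== SOURCE B (Python) =====
-- def _emit_batches(run, max_batch):
--     """Split a run of consecutive TRY_IT sections into max_batch-sized chunks;
--     a chunk of one passes through unchanged, larger chunks are merged."""
--     out = []
--     step = max(max_batch, 1)
--     for k in range(0, len(run), step):
--         chunk = run[k:k + step]
--         if len(chunk) == 1:
--             out.append(chunk[0])
--         else:
--             parts = [
--                 "({}) {}\n{}".format(chr(97 + j), s["title"], s["text"])
--                 for j, s in enumerate(chunk)
--             ]
--             out.append({
--                 "title": "{} – {}".format(chunk[0]["title"], chunk[-1]["title"]),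
--                 "text": "\n\n".join(parts),
--                 "section_type": "TRY_IT_BATCH",
--             })
--     return out
--
--
-- def _batch_consecutive_try_its(
--     sections: list[dict],
--     max_batch: int = 4,
-- ) -> list[dict]:
--     """Single pass with a pending-run accumulator instead of index arithmetic."""
--     result: list[dict] = []
--     run: list[dict] = []
--     for s in sections:
--         if s.get("section_type") == "TRY_IT":
--             run.append(s)
--         else:
--             result.extend(_emit_batches(run, max_batch))
--             run = []
--             result.append(s)
--     result.extend(_emit_batches(run, max_batch))
--     return result
-- ===== Notes on version B (the rewrite author's own statement) =====
-- stated objective: idiomatic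
-- what changed: Replaces A's index-based while loop with an inner look-ahead scan (i += len(batch)) by a single pass that accumulates the pending TRY_IT run and a separate helper that chunks a finished run into max_batch-sized batches.
import Mathlib
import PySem

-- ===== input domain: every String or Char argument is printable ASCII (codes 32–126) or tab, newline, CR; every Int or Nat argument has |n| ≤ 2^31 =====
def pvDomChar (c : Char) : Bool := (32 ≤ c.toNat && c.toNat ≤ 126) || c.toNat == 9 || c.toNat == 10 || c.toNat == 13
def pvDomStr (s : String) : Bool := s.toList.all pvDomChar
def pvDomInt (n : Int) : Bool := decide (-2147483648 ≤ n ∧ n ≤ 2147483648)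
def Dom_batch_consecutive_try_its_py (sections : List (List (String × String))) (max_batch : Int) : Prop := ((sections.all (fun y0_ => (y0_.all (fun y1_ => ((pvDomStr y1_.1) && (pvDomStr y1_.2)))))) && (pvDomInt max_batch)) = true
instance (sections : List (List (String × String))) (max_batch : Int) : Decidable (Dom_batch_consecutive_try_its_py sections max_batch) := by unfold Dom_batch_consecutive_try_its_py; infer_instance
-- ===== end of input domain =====

-- B replaces A's index-based while loop (with look-ahead i += len(batch)) by a single
-- pass accumulating the pending TRY_IT run plus a chunking helper; same cost, more idiomatic.


-- ===== PORT A =====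
-- section.get(k) on the dict (association list, first match)
def pvGet (s : List (String × String)) (k : String) : Option String :=
  PySem.Dict.get? ⟨s⟩ k

-- sections[i].get("section_type") == "TRY_IT"
def pvIsTry (s : List (String × String)) : Bool :=
  pvGet s "section_type" == some "TRY_IT"

-- s[k]: total via default "" — Pre_ guarantees the key is present wherever A reads it
def pvVal (s : List (String × String)) (k : String) : String :=
  (pvGet s k).getD ""

-- the merged TRY_IT_BATCH dict (this formatting code is identical in A and in B)
def pvMerged (batch : List (List (String × String))) : List (String × String) :=
  [("title", pvVal (batch.headD []) "title" ++ " – " ++ pvVal (batch.getLastD []) "title"),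
   ("text", PySem.Str.join "\n\n" ((PySem.List.enumerate batch).map (fun js =>
      "(" ++ String.ofList [Char.ofNat (97 + js.1).toNat] ++ ") " ++
        pvVal js.2 "title" ++ "\n" ++ pvVal js.2 "text"))),
   ("section_type", "TRY_IT_BATCH")]

-- A's inner while: collect further consecutive TRY_ITs while len(batch) < max_batch
-- (max_more = max_batch - len(batch) so far)
def takeTryA (max_more : Int) : List (List (String × String)) → List (List (String × String))
  | [] => []
  | s :: rest =>
    if pvIsTry s && decide (0 < max_more) then s :: takeTryA (max_more - 1) rest else []

-- A's outer while over the remaining suffix; i += len(batch) becomes dropping the run tail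
def goA (max_batch : Int) : List (List (String × String)) → List (List (String × String))
  | [] => []
  | s :: rest =>
    if pvIsTry s = false then s :: goA max_batch rest
    else
      let batch := s :: takeTryA (max_batch - 1) rest
      (if batch.length = 1 then s else pvMerged batch) ::
        goA max_batch (rest.drop (batch.length - 1))
termination_by l => l.length
decreasing_by all_goals (simp [List.length_drop]; try omega)

def batch_consecutive_try_its_py (sections : List (List (String × String))) (max_batch : Int) : List (List (String × String)) :=
  goA max_batch sections

-- ===== PORT B =====
-- Source B's _emit_batches: for k in range(0, len(run), max(max_batch, 1)): chunk = run[k:k+step]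
def emitB (max_batch : Int) : List (List (String × String)) → List (List (String × String))
  | [] => []
  | s :: t =>
    let step := (max max_batch 1).toNat
    let chunk := (s :: t).take step
    (if chunk.length = 1 then chunk.headD [] else pvMerged chunk) ::
      emitB max_batch (t.drop (step - 1))
termination_by l => l.length
decreasing_by all_goals (simp [List.length_drop]; try omega)

-- Source B's single for-loop: state (result, pending run); final flush of the run
def batch_consecutive_try_its_py_alt (sections : List (List (String × String))) (max_batch : Int) : List (List (String × String)) :=
  let acc := sections.foldl
    (fun (acc : List (List (String × String)) × List (List (String × String))) s =>
      if pvIsTry s then (acc.1, acc.2 ++ [s])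
      else (acc.1 ++ emitB max_batch acc.2 ++ [s], []))
    ([], [])
  acc.1 ++ emitB max_batch acc.2

-- ===== PRECONDITION & SPEC =====
-- Pre_ excludes inputs where a TRY_IT section lacks a "title" or "text" key: inside a
-- merged batch A raises KeyError there; a SOLO such TRY_IT is also excluded (A passes it
-- through, B does the same) to keep the condition a simple closed form over each section.
def Pre_batch_consecutive_try_its_py (sections : List (List (String × String))) (max_batch : Int) : Prop :=
  ∀ s ∈ sections, PySem.Dict.get? (⟨s⟩ : PySem.Dict String String) "section_type" = some "TRY_IT" →
    (PySem.Dict.get? (⟨s⟩ : PySem.Dict String String) "title").isSome = true ∧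
    (PySem.Dict.get? (⟨s⟩ : PySem.Dict String String) "text").isSome = true

instance (sections : List (List (String × String))) (max_batch : Int) : Decidable (Pre_batch_consecutive_try_its_py sections max_batch) := by
  unfold Pre_batch_consecutive_try_its_py; infer_instance

def pvWitness_batch_consecutive_try_its_py : (List (List (String × String))) × Int :=
  ([[("section_type", "TRY_IT"), ("title", "Try 1"), ("text", "do a")],
    [("section_type", "TRY_IT"), ("title", "Try 2"), ("text", "do b")],
    [("title", "Intro"), ("text", "read")]], 4)

def Spec_batch_consecutive_try_its_py (sections : List (List (String × String))) (max_batch : Int) (out : List (List (String × String))) : Prop := out = batch_consecutive_try_its_py_alt sections max_batch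
instance (sections : List (List (String × String))) (max_batch : Int) (out : List (List (String × String))) : Decidable (Spec_batch_consecutive_try_its_py sections max_batch out) := by unfold Spec_batch_consecutive_try_its_py; infer_instance

-- ===== CLAIM (what is proved, stated in full; the proofs are below) =====
def Claim_equal_batch_consecutive_try_its_py : Prop := ∀ (sections : List (List (String × String))) (max_batch : Int), Dom_batch_consecutive_try_its_py sections max_batch → Pre_batch_consecutive_try_its_py sections max_batch → Spec_batch_consecutive_try_its_py sections max_batch (batch_consecutive_try_its_py sections max_batch)

-- ===== LEMMAS AND PROOFS =====

-- proof-side recursion equivalent to B's fold: pending run + remaining sections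
def bGo (max_batch : Int) (run : List (List (String × String))) : List (List (String × String)) → List (List (String × String))
  | [] => emitB max_batch run
  | s :: rest =>
    if pvIsTry s then bGo max_batch (run ++ [s]) rest
    else emitB max_batch run ++ s :: bGo max_batch [] rest

lemma foldl_eq_bGo (mb : Int) (l : List (List (String × String))) (res run : List (List (String × String))) :
    (l.foldl (fun (acc : List (List (String × String)) × List (List (String × String))) s =>
      if pvIsTry s then (acc.1, acc.2 ++ [s])
      else (acc.1 ++ emitB mb acc.2 ++ [s], [])) (res, run)).1 ++
      emitB mb (l.foldl (fun (acc : List (List (String × String)) × List (List (String × String))) s =>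
      if pvIsTry s then (acc.1, acc.2 ++ [s])
      else (acc.1 ++ emitB mb acc.2 ++ [s], [])) (res, run)).2
    = res ++ bGo mb run l := by
  induction l generalizing res run with
  | nil => simp [bGo]
  | cons s rest ih =>
    simp only [List.foldl_cons]
    by_cases h : pvIsTry s = true
    · rw [if_pos h, bGo, if_pos h]
      exact ih res (run ++ [s])
    · rw [if_neg h, bGo, if_neg h, ih]
      simp [List.append_assoc]

lemma takeTryA_spec (n : Int) (t u : List (List (String × String)))
    (ht : ∀ s ∈ t, pvIsTry s = true) (hu : ∀ z ∈ u.head?, pvIsTry z = false) :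
    takeTryA n (t ++ u) = t.take n.toNat := by
  induction t generalizing n with
  | nil =>
    cases u with
    | nil => simp [takeTryA]
    | cons z r => simp [takeTryA, hu z (by simp)]
  | cons s t' ih =>
    have hs : pvIsTry s = true := ht s (by simp)
    by_cases hn : 0 < n
    · have hnt : n.toNat = (n - 1).toNat + 1 := by omega
      rw [List.cons_append, takeTryA, if_pos (by simp [hs, hn]),
          ih (n - 1) (fun x hx => ht x (by simp [hx])), hnt, List.take_succ_cons]
    · have hnt : n.toNat = 0 := by omega
      rw [List.cons_append, takeTryA, if_neg (by simp [hn]), hnt]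
      rfl

lemma drop_min_append (k : Nat) (t u : List (List (String × String))) :
    (t ++ u).drop (min k t.length) = t.drop k ++ u := by
  rcases Nat.le_total k t.length with h | h
  · rw [Nat.min_eq_left h, List.drop_append_of_le_length h]
  · rw [Nat.min_eq_right h, List.drop_append_of_le_length (Nat.le_refl _),
        List.drop_length, List.drop_of_length_le h]

lemma goA_run (mb : Int) : ∀ (fuel : Nat) (run u : List (List (String × String))),
    run.length ≤ fuel → (∀ s ∈ run, pvIsTry s = true) → (∀ z ∈ u.head?, pvIsTry z = false) →
    goA mb (run ++ u) = emitB mb run ++ goA mb u := by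
  intro fuel
  induction fuel with
  | zero =>
    intro run u hlen _ _
    have : run = [] := List.eq_nil_of_length_eq_zero (Nat.le_zero.mp hlen)
    simp [this, emitB]
  | succ m ih =>
    intro run u hlen hrun hu
    cases run with
    | nil => simp [emitB]
    | cons s t =>
      have hs : pvIsTry s = true := hrun s (by simp)
      set k := (mb - 1).toNat with hk
      have hstep : (max mb 1).toNat = k + 1 := by omega
      have htake : takeTryA (mb - 1) (t ++ u) = t.take k :=
        takeTryA_spec (mb - 1) t u (fun x hx => hrun x (by simp [hx])) hu
      have hrec : goA mb ((t.drop k) ++ u) = emitB mb (t.drop k) ++ goA mb u := by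
        refine ih (t.drop k) u ?_ (fun x hx => hrun x (by simp [List.mem_of_mem_drop hx])) hu
        have h1 : (t.drop k).length = t.length - k := List.length_drop
        simp at hlen
        omega
      rw [List.cons_append]
      simp only [goA, htake]
      rw [if_neg (by simp [hs])]
      have hlen1 : (s :: List.take k t).length - 1 = min k t.length := by
        simp [List.length_take]
      rw [hlen1, drop_min_append, hrec]
      simp only [emitB, hstep, Nat.add_sub_cancel, List.take_succ_cons, List.headD_cons]
      simp [List.cons_append]

lemma bGo_eq_goA (mb : Int) (u : List (List (String × String))) :
    ∀ run, (∀ s ∈ run, pvIsTry s = true) → bGo mb run u = goA mb (run ++ u) := by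
  induction u with
  | nil =>
    intro run hrun
    have h := goA_run mb run.length run [] (Nat.le_refl _) hrun (by simp)
    simp only [List.append_nil, goA] at h
    rw [show bGo mb run [] = emitB mb run from rfl, List.append_nil, h]
  | cons s rest ih =>
    intro run hrun
    by_cases hs : pvIsTry s = true
    · have hall : ∀ x ∈ run ++ [s], pvIsTry x = true := by
        intro x hx
        rcases List.mem_append.mp hx with h | h
        · exact hrun x h
        · simp at h; subst h; exact hs
      rw [show bGo mb run (s :: rest) = if pvIsTry s then bGo mb (run ++ [s]) rest else emitB mb run ++ s :: bGo mb [] rest from rfl, if_pos hs, ih (run ++ [s]) hall,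
          show (run ++ [s]) ++ rest = run ++ s :: rest by simp]
    · have hs' : pvIsTry s = false := by revert hs; cases pvIsTry s <;> simp
      have h1 : bGo mb [] rest = goA mb rest := by simpa using ih [] (by simp)
      have h2 : goA mb (run ++ s :: rest) = emitB mb run ++ goA mb (s :: rest) :=
        goA_run mb run.length run (s :: rest) (Nat.le_refl _) hrun (by
          intro z hz; simp at hz; subst hz; exact hs')
      have h3 : goA mb (s :: rest) = s :: goA mb rest := by
        rw [goA, if_pos hs']
      rw [show bGo mb run (s :: rest) = if pvIsTry s then bGo mb (run ++ [s]) rest else emitB mb run ++ s :: bGo mb [] rest from rfl, if_neg hs, h1, h2, h3]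

-- ===== VERDICT (by name: the statement is the Claim_ definition above) =====
theorem batch_consecutive_try_its_py_spec : Claim_equal_batch_consecutive_try_its_py := by
  intro sections max_batch _ _
  unfold Spec_batch_consecutive_try_its_py
  unfold batch_consecutive_try_its_py batch_consecutive_try_its_py_alt
  rw [show (([], []) : List (List (String × String)) × List (List (String × String)))
      = (([] : List (List (String × String))), ([] : List (List (String × String)))) from rfl]
  rw [foldl_eq_bGo max_batch sections [] []]
  rw [bGo_eq_goA max_batch sections [] (by simp)]
  simp
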